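-- pv_equiv track=rewrite | github.com/Nebuloupe/Nebuloupe | rules/azure/nsg_open.py | is_port_exposed
-- ===== SOURCE A (Python) =====
-- def is_port_exposed(ports_property, target_ports=(22, 3389)):
--     """
--     Checks if a port property (string or list) overlaps with the target ports.
--     Handles '*', '22', '20-30', or lists of these.
--     """
--     if not ports_property:
--         return False
--
--     ports_list = ports_property if isinstance(ports_property, list) else [ports_property]
--
--     for port_item in ports_list:
--         if port_item == '*':
--             return True
--         try:
--             if '-' in port_item:
--                 start_port, end_port = map(int, port_item.split('-'))
--                 for tp in target_ports:
--                     if start_port <= tp <= end_port: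
--                         return True
--             else:
--                 if int(port_item) in target_ports:
--                     return True
--         except ValueError:
--             continue
--     return False
-- ===== SOURCE B (Python) =====
-- def is_port_exposed(ports_property, target_ports=(22, 3389)):
--     """Interval-union version: parse rules into intervals, sort them by start,
--     merge overlapping intervals into a disjoint union, then test targets."""
--     if not ports_property:
--         return False
--     ports_list = ports_property if isinstance(ports_property, list) else [ports_property]
--     if any(item == '*' for item in ports_list):
--         return True
--     intervals = []
--     for item in ports_list:
--         try:
--             if '-' in item:
--                 lo, hi = map(int, item.split('-'))
--             else:
--                 lo = hi = int(item)
--         except ValueError: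
--             continue
--         intervals.append((lo, hi))
--     intervals.sort(key=lambda iv: iv[0])
--     merged = []
--     cur = None
--     for lo, hi in intervals:
--         if cur is None:
--             cur = (lo, hi)
--         elif lo <= cur[1]:
--             cur = (cur[0], max(cur[1], hi))
--         else:
--             merged.append(cur)
--             cur = (lo, hi)
--     if cur is not None:
--         merged.append(cur)
--     return any(lo <= tp <= hi for tp in target_ports for lo, hi in merged)
-- ===== Notes on version B (the rewrite author's own statement) =====
-- stated objective: alternative
-- what changed: A tests every target against every rule inline with early returns; B instead builds the union of the port ranges as a data structure (parse to intervals, sort by start, merge overlaps into disjoint intervals) and then scans the targets against that merged union.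
import Mathlib
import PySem

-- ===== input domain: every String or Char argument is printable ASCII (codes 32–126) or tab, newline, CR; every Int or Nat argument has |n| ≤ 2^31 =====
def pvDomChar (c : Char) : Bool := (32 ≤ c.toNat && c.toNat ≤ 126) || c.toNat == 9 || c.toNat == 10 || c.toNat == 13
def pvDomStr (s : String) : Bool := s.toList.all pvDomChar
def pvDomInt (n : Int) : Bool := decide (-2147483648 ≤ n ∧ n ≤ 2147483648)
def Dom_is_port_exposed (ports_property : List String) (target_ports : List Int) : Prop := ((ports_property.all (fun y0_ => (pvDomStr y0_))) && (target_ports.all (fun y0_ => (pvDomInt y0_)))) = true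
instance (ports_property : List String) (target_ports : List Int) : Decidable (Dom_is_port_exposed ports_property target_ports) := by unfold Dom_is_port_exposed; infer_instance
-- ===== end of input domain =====

-- B replaces A's inline per-rule/per-target testing with a different data structure: it builds the
-- union of the port ranges once (parse to intervals, sort by start, merge overlaps into a disjoint
-- union) and then scans the targets against that merged union; objective: alternative.

-- ===== PORT A =====
-- the 'for port_item in ports_list' loop of A (early return True; except ValueError → continue)
def pvALoop (target_ports : List Int) : List String → Bool
  | [] => false
  | item :: rest =>
    if item == "*" then true
    else
      if PySem.Str.isIn "-" item then
        -- start_port, end_port = map(int, port_item.split('-')); any unpack/int failure is a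
        -- ValueError caught by the except → continue, so every non-two-ints shape continues
        match PySem.Str.split? item "-" with
        | some [s1, s2] =>
          match PySem.Int.ofStr? s1, PySem.Int.ofStr? s2 with
          | some start_port, some end_port =>
            -- for tp in target_ports: if start_port <= tp <= end_port: return True
            if target_ports.any (fun tp => decide (start_port ≤ tp) && decide (tp ≤ end_port)) then true
            else pvALoop target_ports rest
          | _, _ => pvALoop target_ports rest
        | _ => pvALoop target_ports rest
      else
        match PySem.Int.ofStr? item with
        | some v => if target_ports.contains v then true else pvALoop target_ports rest
        | none => pvALoop target_ports rest

def is_port_exposed (ports_property : List String) (target_ports : List Int) : Bool :=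
  if ports_property = [] then false
  else pvALoop target_ports ports_property

-- ===== PORT B =====
-- normalize one item to an interval (lo, hi); none = the ValueError B's continue swallows
def pvParse (item : String) : Option (Int × Int) :=
  if PySem.Str.isIn "-" item then
    match PySem.Str.split? item "-" with
    | some [s1, s2] =>
      match PySem.Int.ofStr? s1, PySem.Int.ofStr? s2 with
      | some lo, some hi => some (lo, hi)
      | _, _ => none
    | _ => none
  else (PySem.Int.ofStr? item).map (fun v => (v, v))

-- Source B's merge loop: state (merged, cur); one step per sorted interval
def pvMergeStep (st : List (Int × Int) × Option (Int × Int)) (iv : Int × Int) :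
    List (Int × Int) × Option (Int × Int) :=
  match st.2 with
  | none => (st.1, some iv)
  | some c =>
    if iv.1 ≤ c.2 then (st.1, some (c.1, max c.2 iv.2))
    else (st.1 ++ [c], some iv)

-- 'if cur is not None: merged.append(cur)'
def pvMergeFinish (st : List (Int × Int) × Option (Int × Int)) : List (Int × Int) :=
  match st.2 with
  | none => st.1
  | some c => st.1 ++ [c]

def is_port_exposed_alt (ports_property : List String) (target_ports : List Int) : Bool :=
  if ports_property = [] then false
  else if ports_property.any (fun item => item == "*") then true
  else
    let intervals := ports_property.filterMap pvParse
    let sortedIvs := PySem.List.sorted intervals (fun iv => iv.1)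
    let merged := pvMergeFinish (sortedIvs.foldl pvMergeStep ([], none))
    target_ports.any (fun tp => merged.any (fun iv => decide (iv.1 ≤ tp) && decide (tp ≤ iv.2)))

-- ===== PRECONDITION & SPEC =====
def Spec_is_port_exposed (ports_property : List String) (target_ports : List Int) (out : Bool) : Prop := out = is_port_exposed_alt ports_property target_ports
instance (ports_property : List String) (target_ports : List Int) (out : Bool) : Decidable (Spec_is_port_exposed ports_property target_ports out) := by unfold Spec_is_port_exposed; infer_instance

-- ===== CLAIM (what is proved, stated in full; the proofs are below) =====
def Claim_equal_is_port_exposed : Prop := ∀ (ports_property : List String) (target_ports : List Int), Dom_is_port_exposed ports_property target_ports → Spec_is_port_exposed ports_property target_ports (is_port_exposed ports_property target_ports)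

-- ===== LEMMAS AND PROOFS =====

-- 'tp is covered by some interval of xs'
def pvCov (tp : Int) (xs : List (Int × Int)) : Prop := ∃ iv ∈ xs, iv.1 ≤ tp ∧ tp ≤ iv.2

-- the common propositional meaning of both programs' search
def pvHit (ports_property : List String) (target_ports : List Int) : Prop :=
  (∃ item ∈ ports_property, item = "*") ∨
  (∃ tp ∈ target_ports, ∃ item ∈ ports_property, ∃ iv, pvParse item = some iv ∧ iv.1 ≤ tp ∧ tp ≤ iv.2)

-- one step of A's loop on a non-'*' item, phrased through B's normalizer pvParse
lemma pvItem_step (target_ports : List Int) (item : String) (rest : List String)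
    (hstar : item ≠ "*") :
    (pvALoop target_ports (item :: rest) = true) ↔
      ((∃ tp ∈ target_ports, ∃ iv, pvParse item = some iv ∧ iv.1 ≤ tp ∧ tp ≤ iv.2) ∨
        pvALoop target_ports rest = true) := by
  conv_lhs => rw [pvALoop]
  simp only [pvParse, beq_iff_eq]
  rw [if_neg hstar]
  by_cases hdash : PySem.Str.isIn "-" item = true
  · rw [if_pos hdash, if_pos hdash]
    rcases hsp : PySem.Str.split? item "-" with _ | (_ | ⟨s1, _ | ⟨s2, _ | ⟨s3, t⟩⟩⟩)
    · simp
    · simp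
    · simp
    · rcases h1 : PySem.Int.ofStr? s1 with _ | lo
      · simp [h1]
      · rcases h2 : PySem.Int.ofStr? s2 with _ | hi
        · simp [h1, h2]
        · simp only [h1, h2]
          split_ifs with hany
          · simp only [List.any_eq_true, Bool.and_eq_true, decide_eq_true_iff] at hany
            obtain ⟨tp, htp, hb⟩ := hany
            exact iff_of_true rfl (Or.inl ⟨tp, htp, (lo, hi), rfl, hb⟩)
          · simp only [List.any_eq_true, Bool.and_eq_true, decide_eq_true_iff] at hany
            constructor
            · exact fun h => Or.inr h
            · rintro (⟨tp, htp, iv, hiv, hb⟩ | h)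
              · obtain rfl : (lo, hi) = iv := Option.some.inj hiv
                exact absurd ⟨tp, htp, hb.1, hb.2⟩ hany
              · exact h
    · simp
  · rw [if_neg hdash, if_neg hdash]
    rcases h1 : PySem.Int.ofStr? item with _ | v
    · simp
    · simp only [Option.map_some]
      split_ifs with hmem
      · rw [List.contains_eq_mem, decide_eq_true_iff] at hmem
        exact iff_of_true rfl (Or.inl ⟨v, hmem, (v, v), rfl, le_refl v, le_refl v⟩)
      · rw [List.contains_eq_mem, decide_eq_true_iff] at hmem
        constructor
        · exact fun h => Or.inr h
        · rintro (⟨tp, htp, iv, hiv, hb⟩ | h)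
          · obtain rfl : (v, v) = iv := Option.some.inj hiv
            obtain rfl : tp = v := le_antisymm hb.2 hb.1
            exact absurd htp hmem
          · exact h

lemma pvALoop_iff (target_ports : List Int) (pp : List String) :
    pvALoop target_ports pp = true ↔ pvHit pp target_ports := by
  induction pp with
  | nil => simp [pvALoop, pvHit]
  | cons item rest ih =>
    by_cases hstar : item = "*"
    · subst hstar
      refine iff_of_true (by simp [pvALoop]) (Or.inl ⟨"*", by simp⟩)
    · rw [pvItem_step target_ports item rest hstar, ih]
      simp only [pvHit, List.mem_cons]
      constructor
      · rintro (⟨tp, htp, iv, hiv, hb⟩ | hstar' | ⟨tp, htp, it, hit, iv, hiv, hb⟩)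
        · exact Or.inr ⟨tp, htp, item, Or.inl rfl, iv, hiv, hb⟩
        · obtain ⟨it, hit, rfl⟩ := hstar'
          exact Or.inl ⟨"*", Or.inr hit, rfl⟩
        · exact Or.inr ⟨tp, htp, it, Or.inr hit, iv, hiv, hb⟩
      · rintro (⟨it, (rfl | hit), rfl⟩ | ⟨tp, htp, it, (rfl | hit), iv, hiv, hb⟩)
        · exact absurd rfl hstar
        · exact Or.inr (Or.inl ⟨_, hit, rfl⟩)
        · exact Or.inl ⟨tp, htp, iv, hiv, hb⟩
        · exact Or.inr (Or.inr ⟨tp, htp, it, hit, iv, hiv, hb⟩)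

-- pvCov rewriting kit
lemma pvCov_nil (tp : Int) : pvCov tp ([] : List (Int × Int)) ↔ False := by
  simp [pvCov]

lemma pvCov_append (tp : Int) (xs ys : List (Int × Int)) :
    pvCov tp (xs ++ ys) ↔ pvCov tp xs ∨ pvCov tp ys := by
  simp [pvCov, List.mem_append, or_and_right, exists_or]

lemma pvCov_cons (tp : Int) (iv : Int × Int) (ys : List (Int × Int)) :
    pvCov tp (iv :: ys) ↔ (iv.1 ≤ tp ∧ tp ≤ iv.2) ∨ pvCov tp ys := by
  simp [pvCov, List.mem_cons, or_and_right, exists_or]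

-- the merge loop preserves coverage: given the starts are sorted, the union of the intervals
-- produced by the loop is the union of (done intervals) + (current interval) + (remaining input)
lemma pvMerge_cov (tp : Int) :
    ∀ (l : List (Int × Int)) (acc : List (Int × Int)) (cur : Option (Int × Int)),
      List.Pairwise (fun a b : Int × Int => a.1 ≤ b.1) (cur.toList ++ l) →
      (pvCov tp (pvMergeFinish (l.foldl pvMergeStep (acc, cur))) ↔
        pvCov tp acc ∨ pvCov tp cur.toList ∨ pvCov tp l) := by
  intro l
  induction l with
  | nil =>
    intro acc cur _
    cases cur with
    | none => simp [pvMergeFinish, pvCov_nil]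
    | some c =>
      simp only [List.foldl_nil, pvMergeFinish, Option.toList]
      rw [pvCov_append]
      simp [pvCov_nil]
  | cons iv l ih =>
    intro acc cur hpw
    cases cur with
    | none =>
      simp only [Option.toList, List.nil_append] at hpw
      simp only [List.foldl_cons, pvMergeStep]
      rw [ih acc (some iv) (by simpa using hpw)]
      simp only [Option.toList, pvCov_cons, pvCov_nil]
      tauto
    | some c =>
      simp only [Option.toList, List.singleton_append] at hpw
      rw [List.pairwise_cons] at hpw
      obtain ⟨hc, hl⟩ := hpw
      simp only [List.foldl_cons, pvMergeStep]
      by_cases hle : iv.1 ≤ c.2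
      · rw [if_pos hle]
        have hc1 : c.1 ≤ iv.1 := hc iv List.mem_cons_self
        have hlpw := List.pairwise_cons.mp hl
        have hchain : List.Pairwise (fun a b : Int × Int => a.1 ≤ b.1)
            ((some (c.1, max c.2 iv.2)).toList ++ l) := by
          simp only [Option.toList, List.singleton_append, List.pairwise_cons]
          exact ⟨fun b hb => le_trans hc1 (hlpw.1 b hb), hlpw.2⟩
        rw [ih acc (some (c.1, max c.2 iv.2)) hchain]
        have hkey : (c.1 ≤ tp ∧ tp ≤ max c.2 iv.2) ↔
            ((c.1 ≤ tp ∧ tp ≤ c.2) ∨ (iv.1 ≤ tp ∧ tp ≤ iv.2)) := by omega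
        simp only [Option.toList, pvCov_cons]
        rw [hkey]
        tauto
      · rw [if_neg hle]
        rw [ih (acc ++ [c]) (some iv) (by simpa using hl)]
        rw [pvCov_append]
        simp only [Option.toList, pvCov_cons]
        tauto

-- coverage of B's target scan after sort+merge = coverage of the raw parsed intervals
lemma pvMerged_cov (tp : Int) (ivs : List (Int × Int)) :
    pvCov tp (pvMergeFinish ((PySem.List.sorted ivs (fun iv => iv.1)).foldl pvMergeStep ([], none)))
      ↔ pvCov tp ivs := by
  have hperm := PySem.List.sorted_perm (xs := ivs) (key := fun iv : Int × Int => iv.1) (rev := false)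
  have hpw := PySem.List.sorted_pairwise (xs := ivs) (key := fun iv : Int × Int => iv.1)
  rw [pvMerge_cov tp _ [] none (by simpa using hpw)]
  simp only [pvCov_nil, Option.toList, false_or]
  constructor
  · rintro ⟨iv, hiv, hb⟩
    exact ⟨iv, hperm.mem_iff.mp hiv, hb⟩
  · rintro ⟨iv, hiv, hb⟩
    exact ⟨iv, hperm.mem_iff.mpr hiv, hb⟩

lemma pvAlt_iff (target_ports : List Int) (pp : List String) (h : pp ≠ []) :
    is_port_exposed_alt pp target_ports = true ↔ pvHit pp target_ports := by
  simp only [is_port_exposed_alt, h, if_false, pvHit]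
  split_ifs with hstar
  · simp only [List.any_eq_true, beq_iff_eq] at hstar
    exact iff_of_true rfl (Or.inl hstar)
  · simp only [List.any_eq_true, beq_iff_eq] at hstar
    simp only [List.any_eq_true, Bool.and_eq_true, decide_eq_true_iff]
    constructor
    · rintro ⟨tp, htp, hcov⟩
      have : pvCov tp (pp.filterMap pvParse) := (pvMerged_cov tp _).mp hcov
      obtain ⟨iv, hiv, hb⟩ := this
      obtain ⟨it, hit, hp⟩ := List.mem_filterMap.mp hiv
      exact Or.inr ⟨tp, htp, it, hit, iv, hp, hb⟩
    · rintro (h' | ⟨tp, htp, it, hit, iv, hiv, hb⟩)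
      · exact absurd h' hstar
      · refine ⟨tp, htp, (pvMerged_cov tp _).mpr ?_⟩
        exact ⟨iv, List.mem_filterMap.mpr ⟨it, hit, hiv⟩, hb⟩

-- ===== VERDICT (by name: the statement is the Claim_ definition above) =====
theorem is_port_exposed_spec : Claim_equal_is_port_exposed := by
  intro pp tp _
  unfold Spec_is_port_exposed
  by_cases h : pp = []
  · simp [is_port_exposed, is_port_exposed_alt, h]
  · have := (pvALoop_iff tp pp).trans (pvAlt_iff tp pp h).symm
    simp only [is_port_exposed, h, if_false]
    exact Bool.coe_iff_coe.mp this
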